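-- pv_equiv track=rewrite | github.com/TomiIsojarvi/MOOC-Ohjelmoinnin-perusteet-2023-Python | Osa 4/osa04-26_arvosanatilasto/src/arvosanatilasto.py | laske_arvosanat
-- ===== SOURCE A (Python) =====
-- def laske_harjoituspisteet(syote: list):
-- 	pisteet = []
--
-- 	for i in range(1,len(syote),2):
-- 		pisteet.append(syote[i] // 10)
--
-- 	return pisteet
--
-- def laske_pisteet(syote: list):
-- 	harj_pisteet = laske_harjoituspisteet(syote)
-- 	pisteet = []
--
-- 	for i in range(0, len(syote), 2):
-- 		pisteet.append(syote[i] + harj_pisteet[i // 2])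
--
-- 	return pisteet
--
-- def laske_arvosanat(syote: list):
-- 	pisteet = laske_pisteet(syote)
-- 	arvosanat = []
--
-- 	for i in range(0, len(syote), 2):
-- 		j = i // 2
--
-- 		if syote[i] < 10:
-- 			arvosanat.append(0)
-- 			continue
--
-- 		if pisteet[j] >= 0 and pisteet[j] < 15:
-- 			arvosanat.append(0)
-- 		elif pisteet[j] >= 15 and pisteet[j] < 18:
-- 			arvosanat.append(1)
-- 		elif pisteet[j] >= 18 and pisteet[j] < 21:
-- 			arvosanat.append(2)
-- 		elif pisteet[j] >= 21 and pisteet[j] < 24: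
-- 			arvosanat.append(3)
-- 		elif pisteet[j] >= 24 and pisteet[j] < 28:
-- 			arvosanat.append(4)
-- 		else:
-- 			arvosanat.append(5)
--
-- 	return arvosanat
-- ===== SOURCE B (Python) =====
-- def _arvosana(koe, harjoitukset):
--     if koe < 10:
--         return 0
--     yhteensa = koe + harjoitukset // 10
--     if 0 <= yhteensa < 28:
--         return sum(yhteensa >= raja for raja in (15, 18, 21, 24))
--     return 5
--
-- def laske_arvosanat(syote: list):
--     arvosanat = []
--     koe = None
--     for x in syote:
--         if koe is None:
--             koe = x
--         else:
--             arvosanat.append(_arvosana(koe, x))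
--             koe = None
--     return arvosanat
-- ===== Notes on version B (the rewrite author's own statement) =====
-- stated objective: simpler
-- what changed: Replaced the three sequential index loops with their two intermediate lists by one single pass over the elements that pairs each exam score with the following exercise score on the fly (constant-factor win: one traversal, no intermediate lists, no repeated indexing), and replaced the six-branch if/elif grade chain by counting how many thresholds the total reaches (out-of-band totals give 5, as in A).
import Mathlib
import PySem

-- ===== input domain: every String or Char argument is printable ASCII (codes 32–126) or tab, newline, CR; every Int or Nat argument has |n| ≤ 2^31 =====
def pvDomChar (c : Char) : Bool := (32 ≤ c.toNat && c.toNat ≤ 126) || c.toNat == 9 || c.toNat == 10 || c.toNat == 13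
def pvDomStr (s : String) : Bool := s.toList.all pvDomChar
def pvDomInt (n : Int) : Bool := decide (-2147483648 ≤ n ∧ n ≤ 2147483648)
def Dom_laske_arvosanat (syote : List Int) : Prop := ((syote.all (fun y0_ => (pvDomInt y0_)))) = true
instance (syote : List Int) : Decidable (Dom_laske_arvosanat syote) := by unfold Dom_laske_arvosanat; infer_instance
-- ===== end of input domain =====

-- B replaces A's three sequential index loops (and two intermediate lists) by one single
-- pass that pairs each exam score with the following exercise score; same results.

-- ===== PORT A =====
def laske_harjoituspisteet (syote : List Int) : List Int :=
  (PySem.List.pyRange 1 (syote.length : Int) 2).foldl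
    (fun pisteet i => pisteet ++ [PySem.Int.floordiv (PySem.List.pyGetD syote i 0) 10]) []

def laske_pisteet (syote : List Int) : List Int :=
  let harj_pisteet := laske_harjoituspisteet syote
  (PySem.List.pyRange 0 (syote.length : Int) 2).foldl
    (fun pisteet i =>
      pisteet ++ [PySem.List.pyGetD syote i 0 +
        PySem.List.pyGetD harj_pisteet (PySem.Int.floordiv i 2) 0]) []

def laske_arvosanat (syote : List Int) : List Int :=
  let pisteet := laske_pisteet syote
  (PySem.List.pyRange 0 (syote.length : Int) 2).foldl
    (fun arvosanat i =>
      let j := PySem.Int.floordiv i 2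
      if PySem.List.pyGetD syote i 0 < 10 then arvosanat ++ [0]
      else
        let p := PySem.List.pyGetD pisteet j 0
        if 0 ≤ p ∧ p < 15 then arvosanat ++ [0]
        else if 15 ≤ p ∧ p < 18 then arvosanat ++ [1]
        else if 18 ≤ p ∧ p < 21 then arvosanat ++ [2]
        else if 21 ≤ p ∧ p < 24 then arvosanat ++ [3]
        else if 24 ≤ p ∧ p < 28 then arvosanat ++ [4]
        else arvosanat ++ [5]) []

-- ===== PORT B =====
def pvArvosana (koe harjoitukset : Int) : Int :=
  if koe < 10 then 0
  else
    let yhteensa := koe + PySem.Int.floordiv harjoitukset 10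
    if 0 ≤ yhteensa ∧ yhteensa < 28 then
      ([15, 18, 21, 24] : List Int).foldl
        (fun s raja => s + (if yhteensa ≥ raja then 1 else 0)) 0
    else 5

def laske_arvosanat_alt (syote : List Int) : List Int :=
  (syote.foldl
    (fun st x =>
      match st.1 with
      | none => (some x, st.2)
      | some koe => (none, st.2 ++ [pvArvosana koe x]))
    ((none : Option Int), ([] : List Int))).2

-- ===== PRECONDITION & SPEC =====
-- Pre_ excludes odd-length inputs, on which A raises IndexError (harj_pisteet is one short).
def Pre_laske_arvosanat (syote : List Int) : Prop := syote.length % 2 = 0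
instance (syote : List Int) : Decidable (Pre_laske_arvosanat syote) := by
  unfold Pre_laske_arvosanat; infer_instance
def pvWitness_laske_arvosanat : List Int := [20, 55, 5, 100]

def Spec_laske_arvosanat (syote : List Int) (out : List Int) : Prop := out = laske_arvosanat_alt syote
instance (syote : List Int) (out : List Int) : Decidable (Spec_laske_arvosanat syote out) := by unfold Spec_laske_arvosanat; infer_instance

-- ===== CLAIM (what is proved, stated in full; the proofs are below) =====
def Claim_equal_laske_arvosanat : Prop := ∀ (syote : List Int), Dom_laske_arvosanat syote → Pre_laske_arvosanat syote → Spec_laske_arvosanat syote (laske_arvosanat syote)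

-- ===== LEMMAS AND PROOFS =====

-- the grade A's if/elif chain assigns to one (exam, exercise) pair
def pvChain (a b : Int) : Int :=
  let p := a + PySem.Int.floordiv b 10
  if a < 10 then 0
  else if 0 ≤ p ∧ p < 15 then 0
  else if 15 ≤ p ∧ p < 18 then 1
  else if 18 ≤ p ∧ p < 21 then 2
  else if 21 ≤ p ∧ p < 24 then 3
  else if 24 ≤ p ∧ p < 28 then 4
  else 5

def pvPairs : List Int → List Int
  | a :: b :: rest => pvArvosana a b :: pvPairs rest
  | _ => []

lemma pvChain_eq (a b : Int) : pvChain a b = pvArvosana a b := by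
  unfold pvChain pvArvosana
  simp only [List.foldl]
  split_ifs <;> omega


lemma pyRange_zero_two (m : Nat) :
    PySem.List.pyRange 0 (2 * (m : Int)) 2 = (List.range m).map (fun k : Nat => 2 * (k : Int)) := by
  rw [PySem.List.pyRange_of_pos _ _ (by norm_num)]
  rcases Nat.eq_zero_or_pos m with h | h
  · subst h; simp
  · have h1 : (0 : Int) < 2 * (m : Int) := by positivity
    rw [if_pos h1]
    have h2 : ((2 * (m : Int) - 0 + 2 - 1) / 2).toNat = m := by omega
    rw [h2]
    exact List.map_congr_left (fun k _ => by ring)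

lemma pyRange_one_two (m : Nat) :
    PySem.List.pyRange 1 (2 * (m : Int)) 2 = (List.range m).map (fun k : Nat => 1 + 2 * (k : Int)) := by
  rw [PySem.List.pyRange_of_pos _ _ (by norm_num)]
  rcases Nat.eq_zero_or_pos m with h | h
  · subst h; simp
  · have h1 : (1 : Int) < 2 * (m : Int) := by omega
    rw [if_pos h1]
    have h2 : ((2 * (m : Int) - 1 + 2 - 1) / 2).toNat = m := by omega
    rw [h2]

lemma floordiv_two_mul (k : Int) : PySem.Int.floordiv (2 * k) 2 = k := by
  simp [PySem.Int.floordiv]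

lemma harj_eq (syote : List Int) (m : Nat) (h : syote.length = 2 * m) :
    laske_harjoituspisteet syote =
      (List.range m).map (fun k : Nat => PySem.Int.floordiv (PySem.List.pyGetD syote (1 + 2 * (k : Int)) 0) 10) := by
  unfold laske_harjoituspisteet
  rw [h]
  push_cast
  rw [pyRange_one_two, List.foldl_map, PySem.List.foldl_append_singleton_eq_map, List.nil_append]

lemma pisteet_eq (syote : List Int) (m : Nat) (h : syote.length = 2 * m) :
    laske_pisteet syote =
      (List.range m).map (fun k : Nat =>
        PySem.List.pyGetD syote (2 * (k : Int)) 0 +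
          PySem.Int.floordiv (PySem.List.pyGetD syote (1 + 2 * (k : Int)) 0) 10) := by
  unfold laske_pisteet
  rw [harj_eq syote m h, h]
  push_cast
  rw [pyRange_zero_two, List.foldl_map, PySem.List.foldl_append_singleton_eq_map, List.nil_append]
  apply List.map_congr_left
  intro k hk
  rw [floordiv_two_mul, PySem.List.pyGetD_natCast,
    PySem.List.getD_map_range _ _ _ _ (List.mem_range.mp hk)]

lemma pvFoldlAppend {α β : Type} (f : List β → α → List β) (g : α → β) (l : List α)
    (hf : ∀ acc x, x ∈ l → f acc x = acc ++ [g x]) :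
    ∀ acc, l.foldl f acc = acc ++ l.map g := by
  induction l with
  | nil => intro acc; simp
  | cons x xs ih =>
    intro acc
    rw [List.foldl_cons, hf acc x List.mem_cons_self, List.map_cons,
      ih (fun a y hy => hf a y (List.mem_cons_of_mem _ hy))]
    simp

lemma arvosanat_eq (syote : List Int) (m : Nat) (h : syote.length = 2 * m) :
    laske_arvosanat syote =
      (List.range m).map (fun k : Nat =>
        pvChain (PySem.List.pyGetD syote (2 * (k : Int)) 0)
                (PySem.List.pyGetD syote (1 + 2 * (k : Int)) 0)) := by
  unfold laske_arvosanat
  rw [pisteet_eq syote m h, h]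
  push_cast
  rw [pyRange_zero_two, List.foldl_map]
  have step : ∀ (acc : List Int) (k : Nat), k < m →
      (fun (arvosanat : List Int) (i : Int) =>
        let j := PySem.Int.floordiv i 2
        if PySem.List.pyGetD syote i 0 < 10 then arvosanat ++ [0]
        else
          let p := PySem.List.pyGetD
            ((List.range m).map (fun k : Nat =>
              PySem.List.pyGetD syote (2 * (k : Int)) 0 +
                PySem.Int.floordiv (PySem.List.pyGetD syote (1 + 2 * (k : Int)) 0) 10)) j 0
          if 0 ≤ p ∧ p < 15 then arvosanat ++ [0]
          else if 15 ≤ p ∧ p < 18 then arvosanat ++ [1]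
          else if 18 ≤ p ∧ p < 21 then arvosanat ++ [2]
          else if 21 ≤ p ∧ p < 24 then arvosanat ++ [3]
          else if 24 ≤ p ∧ p < 28 then arvosanat ++ [4]
          else arvosanat ++ [5]) acc (2 * (k : Int)) =
      acc ++ [pvChain (PySem.List.pyGetD syote (2 * (k : Int)) 0)
                (PySem.List.pyGetD syote (1 + 2 * (k : Int)) 0)] := by
    intro acc k hk
    simp only [floordiv_two_mul, PySem.List.pyGetD_natCast,
      PySem.List.getD_map_range _ _ _ _ hk, pvChain]
    split_ifs <;> rfl
  rw [pvFoldlAppend _ _ _ (fun acc k hk => step acc k (List.mem_range.mp hk)), List.nil_append]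

lemma map_chain_eq_pairs (m : Nat) : ∀ (syote : List Int), syote.length = 2 * m →
    (List.range m).map (fun k : Nat =>
        pvChain (PySem.List.pyGetD syote (2 * (k : Int)) 0)
                (PySem.List.pyGetD syote (1 + 2 * (k : Int)) 0)) = pvPairs syote := by
  induction m with
  | zero =>
    intro syote h
    have : syote = [] := List.eq_nil_of_length_eq_zero (by omega)
    subst this; simp [pvPairs]
  | succ m ih =>
    intro syote h
    match syote with
    | a :: b :: rest =>
      have hr : rest.length = 2 * m := by simp only [List.length_cons] at h; omega
      rw [List.range_succ_eq_map, List.map_cons, List.map_map, pvPairs]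
      congr 1
      · have h0 : PySem.List.pyGetD (a :: b :: rest) (2 * ((0:Nat) : Int)) 0 = a := by
          norm_num [PySem.List.pyGetD_zero_cons]
        have h1 : PySem.List.pyGetD (a :: b :: rest) (1 + 2 * ((0:Nat) : Int)) 0 = b := by
          rw [show (1 + 2 * ((0:Nat) : Int)) = ((1:Nat) : Int) by norm_num,
            PySem.List.pyGetD_natCast]
          rfl
        rw [h0, h1, pvChain_eq]
      · rw [← ih rest hr]
        apply List.map_congr_left
        intro k hk
        have e1 : (2 * ((Nat.succ k : Nat) : Int)) = ((2 * k + 2 : Nat) : Int) := by push_cast; ring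
        have e2 : (1 + 2 * ((Nat.succ k : Nat) : Int)) = ((2 * k + 3 : Nat) : Int) := by push_cast; ring
        have e3 : (2 * ((k : Nat) : Int)) = ((2 * k : Nat) : Int) := by push_cast; ring
        have e4 : (1 + 2 * ((k : Nat) : Int)) = ((2 * k + 1 : Nat) : Int) := by push_cast; ring
        rw [Function.comp_apply, e2, e1, e4, e3, PySem.List.pyGetD_natCast, PySem.List.pyGetD_natCast,
          PySem.List.pyGetD_natCast, PySem.List.pyGetD_natCast]
        simp [List.getD]
    | [] => simp at h
    | [a] => simp at h; omega
lemma alt_foldl : ∀ (l acc : List Int),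
    (l.foldl
      (fun st x =>
        match st.1 with
        | none => (some x, st.2)
        | some koe => (none, st.2 ++ [pvArvosana koe x]))
      ((none : Option Int), acc)).2 = acc ++ pvPairs l
  | [], acc => by simp [pvPairs]
  | [a], acc => by simp [pvPairs, List.foldl]
  | a :: b :: rest, acc => by
    simp only [List.foldl, pvPairs]
    rw [alt_foldl rest]
    simp

-- ===== VERDICT (by name: the statement is the Claim_ definition above) =====
theorem laske_arvosanat_spec : Claim_equal_laske_arvosanat := by
  intro syote _ hpre
  unfold Pre_laske_arvosanat at hpre
  unfold Spec_laske_arvosanat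
  obtain ⟨m, hm⟩ : ∃ m, syote.length = 2 * m := ⟨syote.length / 2, by omega⟩
  rw [arvosanat_eq syote m hm, map_chain_eq_pairs m syote hm]
  unfold laske_arvosanat_alt
  rw [alt_foldl]
  simp
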